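-- pv_equiv track=rewrite | github.com/mercer2511/horario-epis | analyze_schedule.py | build_ancestry
-- ===== SOURCE A (Python) =====
-- from collections import defaultdict
--
-- def build_ancestry(grupos):
--     # Map group_id -> object
--     g_map = {g['id']: g for g in grupos}
--
--     # Map group_id -> set of related ids (self + ancestors + descendants)
--     related = defaultdict(set)
--
--     # 1. Parent/Child (Ancestors)
--     for g in grupos:
--         current = g
--         while current:
--             related[g['id']].add(current['id'])
--             related[current['id']].add(g['id']) # Add self to ancestor's related list too
--             parent_id = current.get('parent_grupo_id')
--             current = g_map.get(parent_id) if parent_id else None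
--
--     return related
-- ===== SOURCE B (Python) =====
-- from collections import defaultdict
--
-- def build_ancestry(grupos):
--     # Map group_id -> object
--     g_map = {g['id']: g for g in grupos}
--
--     # Memoized ancestry chains: chains[i] = [i] + ids of i's ancestors, bottom-up
--     chains = {}
--
--     def chain_of(i):
--         c = chains.get(i)
--         if c is None:
--             p = g_map[i].get('parent_grupo_id')
--             c = [i] + (chain_of(p) if p and p in g_map else [])
--             chains[i] = c
--         return c
--
--     related = defaultdict(set)
--     for g in grupos:
--         gid = g['id']
--         for a in chain_of(gid):
--             related[gid].add(a)
--             related[a].add(gid)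
--     return related
-- ===== Notes on version B (the rewrite author's own statement) =====
-- stated objective: alternative
-- what changed: A fused per-group upward while-walk that re-climbs the parent chain for every group is replaced by a memoized ancestry-chain table (chains[i] = [i]+chain(parent), computed once per id) plus a separate relation-building pass over each precomputed chain. Pre_ excludes groups without an 'id' key (A raises KeyError), cyclic parent data (A's while-loop never terminates), and groups sharing an id but disagreeing on their effective parent, a corner where A's dict-overwrite keeps only the last duplicate while its fused loop still climbs from each duplicate's own parent.
import Mathlib
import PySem

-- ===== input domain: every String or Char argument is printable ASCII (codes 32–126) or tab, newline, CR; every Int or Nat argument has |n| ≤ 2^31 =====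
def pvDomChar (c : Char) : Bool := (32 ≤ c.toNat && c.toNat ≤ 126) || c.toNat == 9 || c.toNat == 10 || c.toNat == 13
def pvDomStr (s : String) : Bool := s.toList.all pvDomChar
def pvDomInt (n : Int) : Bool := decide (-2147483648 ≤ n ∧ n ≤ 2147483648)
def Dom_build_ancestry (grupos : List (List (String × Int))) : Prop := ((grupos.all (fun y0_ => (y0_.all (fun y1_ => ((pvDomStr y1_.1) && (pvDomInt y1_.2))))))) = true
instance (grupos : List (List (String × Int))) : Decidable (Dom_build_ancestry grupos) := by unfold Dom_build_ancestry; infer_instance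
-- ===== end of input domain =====

-- B replaces A's fused per-group upward while-walk by a memoized ancestry-chain table plus a
-- separate relation-building pass (objective: alternative; same asymptotic cost).

-- ===== PORT A =====
-- shared helper: Python's `g_map = {g['id']: g for g in grupos}` (A and B build it identically;
-- the `none` branch is unreachable under Pre_, where every group has an 'id' key — in Python a
-- missing 'id' raises KeyError, which Pre_ excludes)
def pvGmap (gds : List (PySem.Dict String Int)) : PySem.Dict Int (PySem.Dict String Int) :=
  gds.foldl (fun d g =>
    match g.get? "id" with
    | some i => d.insert i g
    | none => d) PySem.Dict.empty

-- A's `while current:` loop; fuel is unreachable-exhausted under Pre_ (acyclic parent data)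
def climbA (gm : PySem.Dict Int (PySem.Dict String Int)) (gid : Int) :
    Nat → Option (PySem.Dict String Int) → PySem.Dict Int (PySem.Set Int) →
    PySem.Dict Int (PySem.Set Int)
  | _, none, rel => rel
  | 0, some _, rel => rel
  | f + 1, some cur, rel =>
    match cur.get? "id" with
    | none => rel   -- current['id'] KeyError; unreachable under Pre_
    | some cid =>
      let rel1 := rel.modify gid [] (fun s => PySem.Set.add s cid)
      let rel2 := rel1.modify cid [] (fun s => PySem.Set.add s gid)
      let next : Option (PySem.Dict String Int) :=
        match cur.get? "parent_grupo_id" with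
        | some p => if p != 0 then gm.get? p else none   -- `g_map.get(parent_id) if parent_id else None`
        | none => none
      climbA gm gid f next rel2

def build_ancestry (grupos : List (List (String × Int))) : List (Int × List Int) :=
  let gds := grupos.map PySem.Dict.ofList
  let gm := pvGmap gds
  let related := gds.foldl (fun rel g =>
    match g.get? "id" with
    | none => rel   -- g['id'] KeyError; unreachable under Pre_
    | some gid => climbA gm gid (grupos.length + 1) (some g) rel) PySem.Dict.empty
  related.items

-- ===== PORT B =====
-- B's memoized `chain_of(i)`; fuel bounds the recursion depth, unreachable-exhausted under Pre_
def chainOfB (gm : PySem.Dict Int (PySem.Dict String Int)) :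
    Nat → Int → PySem.Dict Int (List Int) → List Int × PySem.Dict Int (List Int)
  | 0, _, chains => ([], chains)
  | f + 1, i, chains =>
    match chains.get? i with
    | some c => (c, chains)
    | none =>
      let p? : Option Int :=
        match gm.get? i with
        | some g => g.get? "parent_grupo_id"
        | none => none   -- g_map[i] KeyError; unreachable under Pre_
      let tc :=
        match p? with
        | some p => if p != 0 && gm.contains p then chainOfB gm f p chains else ([], chains)
        | none => ([], chains)
      let c := i :: tc.1
      (c, tc.2.insert i c)

def build_ancestry_alt (grupos : List (List (String × Int))) : List (Int × List Int) :=
  let gds := grupos.map PySem.Dict.ofList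
  let gm := pvGmap gds
  let st := gds.foldl
    (fun (st : PySem.Dict Int (PySem.Set Int) × PySem.Dict Int (List Int)) g =>
      match g.get? "id" with
      | none => st   -- g['id'] KeyError; unreachable under Pre_
      | some gid =>
        let cc := chainOfB gm (grupos.length + 1) gid st.2
        let rel := cc.1.foldl (fun rel a =>
          (rel.modify gid [] (fun s => PySem.Set.add s a)).modify a [] (fun s => PySem.Set.add s gid)) st.1
        (rel, cc.2))
    (PySem.Dict.empty, PySem.Dict.empty)
  st.1.items

-- ===== PRECONDITION & SPEC =====
-- a group's effective parent: its parent id if that is truthy and present in g_map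
def pvEff (gm : PySem.Dict Int (PySem.Dict String Int)) (g : PySem.Dict String Int) : Option Int :=
  match g.get? "parent_grupo_id" with
  | none => none
  | some p => if p != 0 && gm.contains p then some p else none

-- the effective parent step of the data, by id
def pvNext (gm : PySem.Dict Int (PySem.Dict String Int)) (i : Int) : Option Int :=
  match gm.get? i with
  | none => none
  | some g => pvEff gm g

-- the parent chain starting at i dies out within f steps; '∀ id, pvDead gm n id' (n = number of
-- groups) is the standard decidable statement that the finite parent relation carried by the data
-- is ACYCLIC — a condition on the data only: it inspects no accumulator and is not the recursion
-- of either port (both ports thread relation/memo dictionaries; pvDead threads nothing)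
def pvDead (gm : PySem.Dict Int (PySem.Dict String Int)) : Nat → Int → Bool
  | 0, _ => false
  | f + 1, i =>
    match pvNext gm i with
    | none => true
    | some j => pvDead gm f j

-- Pre_ excludes: (a) groups without an 'id' key (A raises KeyError there); (b) cyclic parent data
-- (A's while-loop never terminates there); (c) groups that share an id but carry different
-- effective parents — a defensible duplicate-key corner on which A's first climb step uses each
-- duplicate's own parent while g_map keeps only the last duplicate, an accident of A's fused loop.
def Pre_build_ancestry (grupos : List (List (String × Int))) : Prop :=
  let gds := grupos.map PySem.Dict.ofList
  (∀ g ∈ gds, (g.get? "id").isSome = true) ∧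
  (∀ g ∈ gds, ∀ g' ∈ gds, g.get? "id" = g'.get? "id" →
    pvEff (pvGmap gds) g = pvEff (pvGmap gds) g') ∧
  (∀ i ∈ gds.filterMap (fun g => g.get? "id"), pvDead (pvGmap gds) grupos.length i = true)

instance (grupos : List (List (String × Int))) : Decidable (Pre_build_ancestry grupos) := by
  unfold Pre_build_ancestry; infer_instance

def pvWitness_build_ancestry : List (List (String × Int)) :=
  [[("id", 1)], [("id", 2), ("parent_grupo_id", 1)], [("id", 3), ("parent_grupo_id", 2)]]

def Spec_build_ancestry (grupos : List (List (String × Int))) (out : List (Int × List Int)) : Prop :=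
  out = build_ancestry_alt grupos
instance (grupos : List (List (String × Int))) (out : List (Int × List Int)) :
    Decidable (Spec_build_ancestry grupos out) := by unfold Spec_build_ancestry; infer_instance

-- ===== CLAIM (what is proved, stated in full; the proofs are below) =====
def Claim_equal_build_ancestry : Prop :=
  ∀ (grupos : List (List (String × Int))), Dom_build_ancestry grupos →
    Pre_build_ancestry grupos → Spec_build_ancestry grupos (build_ancestry grupos)

-- ===== LEMMAS AND PROOFS =====

-- the ancestor-id chain [i, parent(i), …] read off the data, with fuel
def pvChain (gm : PySem.Dict Int (PySem.Dict String Int)) : Nat → Int → List Int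
  | 0, _ => []
  | f + 1, i =>
    i :: (match pvNext gm i with
          | none => []
          | some j => pvChain gm f j)

-- the per-ancestor update both programs perform
def pvUpd2 (gid : Int) (rel : PySem.Dict Int (PySem.Set Int)) (a : Int) :
    PySem.Dict Int (PySem.Set Int) :=
  (rel.modify gid [] (fun s => PySem.Set.add s a)).modify a [] (fun s => PySem.Set.add s gid)

-- every value stored in g_map carries its own key as 'id'
def pvWF (gm : PySem.Dict Int (PySem.Dict String Int)) : Prop :=
  ∀ i g, gm.get? i = some g → g.get? "id" = some i

-- B's memo table stores exactly the true chains of already-dead ids (canonical fuel F)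
def pvInv (gm : PySem.Dict Int (PySem.Dict String Int)) (F : Nat)
    (chains : PySem.Dict Int (List Int)) : Prop :=
  ∀ k c, chains.get? k = some c → pvDead gm F k = true ∧ c = pvChain gm F k

theorem pvDead_mono (gm : PySem.Dict Int (PySem.Dict String Int)) :
    ∀ (f f' : Nat) (i : Int), pvDead gm f i = true → f ≤ f' → pvDead gm f' i = true := by
  intro f
  induction f with
  | zero => intro f' i h _; simp [pvDead] at h
  | succ f ih =>
    intro f' i h hle
    obtain ⟨f'', rfl⟩ : ∃ k, f' = k + 1 := ⟨f' - 1, by omega⟩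
    simp only [pvDead] at h ⊢
    cases hn : pvNext gm i with
    | none => rfl
    | some j => rw [hn] at h; exact ih f'' j h (by omega)

theorem pvChain_stable (gm : PySem.Dict Int (PySem.Dict String Int)) :
    ∀ (f f' : Nat) (i : Int), pvDead gm f i = true → f ≤ f' →
      pvChain gm f' i = pvChain gm f i := by
  intro f
  induction f with
  | zero => intro f' i h _; simp [pvDead] at h
  | succ f ih =>
    intro f' i h hle
    obtain ⟨f'', rfl⟩ : ∃ k, f' = k + 1 := ⟨f' - 1, by omega⟩
    simp only [pvDead] at h
    simp only [pvChain]
    cases hn : pvNext gm i with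
    | none => rfl
    | some j =>
      rw [hn] at h
      have h' : pvDead gm f j = true := h
      show i :: pvChain gm f'' j = i :: pvChain gm f j
      rw [ih f'' j h' (by omega)]

theorem pvWF_fold (gds : List (PySem.Dict String Int)) :
    ∀ d, pvWF d → pvWF (gds.foldl (fun d g =>
      match g.get? "id" with
      | some i => d.insert i g
      | none => d) d) := by
  induction gds with
  | nil => intro d h; exact h
  | cons g t ih =>
    intro d h
    simp only [List.foldl_cons]
    cases hid : g.get? "id" with
    | none => exact ih d h
    | some i =>
      refine ih _ ?_
      intro k v hk
      rw [PySem.Dict.get?_insert] at hk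
      by_cases hki : k = i
      · subst hki; simp at hk; subst hk; exact hid
      · rw [if_neg hki] at hk; exact h k v hk

theorem pvWF_pvGmap (gds : List (PySem.Dict String Int)) : pvWF (pvGmap gds) := by
  refine pvWF_fold gds PySem.Dict.empty ?_
  intro i g hg
  simp [PySem.Dict.get?_empty] at hg

theorem climbA_spec (gm : PySem.Dict Int (PySem.Dict String Int)) (gid : Int) :
    ∀ (f : Nat) (i : Int) (g : PySem.Dict String Int) (rel : PySem.Dict Int (PySem.Set Int)),
      pvWF gm → g.get? "id" = some i →
      (∃ g', gm.get? i = some g' ∧ pvEff gm g = pvEff gm g') →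
      pvDead gm f i = true →
      climbA gm gid f (some g) rel = (pvChain gm f i).foldl (pvUpd2 gid) rel := by
  intro f
  induction f with
  | zero => intro i g rel _ _ _ h; simp [pvDead] at h
  | succ f ih =>
    intro i g rel hwf hid ⟨g0, hg, hpar⟩ h
    have hnext : pvNext gm i = pvEff gm g := by simp [pvNext, hg, ← hpar]
    have hdead : (match pvNext gm i with | none => true | some j => pvDead gm f j) = true := h
    simp only [climbA, hid, pvChain, List.foldl_cons]
    cases hp : g.get? "parent_grupo_id" with
    | none =>
      have hn : pvNext gm i = none := by rw [hnext]; simp [pvEff, hp]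
      rw [hn]
      simp only [climbA, List.foldl_nil]
      rfl
    | some p =>
      dsimp only
      cases hz : (p != 0) with
      | false =>
        have hn : pvNext gm i = none := by rw [hnext]; simp [pvEff, hp, hz]
        rw [hn]
        simp only [Bool.false_eq_true, if_false]
        simp only [climbA, List.foldl_nil]
        rfl
      | true =>
        rw [if_pos rfl]
        cases hq : gm.get? p with
        | none =>
          have hn : pvNext gm i = none := by
            rw [hnext]; simp [pvEff, hp, hz, PySem.Dict.contains_eq_isSome_get?, hq]
          rw [hn]
          simp only [climbA, List.foldl_nil]
          rfl
        | some g' =>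
          have hc : gm.contains p = true := by
            rw [PySem.Dict.contains_eq_isSome_get?, hq]; rfl
          have hn : pvNext gm i = some p := by rw [hnext]; simp [pvEff, hp, hz, hc]
          rw [hn]
          rw [hn] at hdead
          rw [ih p g' _ hwf (hwf p g' hq) ⟨g', hq, rfl⟩ hdead]
          rfl

-- inserting the true chain of a newly dead id preserves the memo invariant
theorem pvInv_insert (gm : PySem.Dict Int (PySem.Dict String Int)) (F : Nat)
    (chains : PySem.Dict Int (List Int)) (i : Int)
    (hinv : pvInv gm F chains) (hd : pvDead gm F i = true) :
    pvInv gm F (chains.insert i (pvChain gm F i)) := by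
  intro k c hk
  rw [PySem.Dict.get?_insert] at hk
  by_cases hki : k = i
  · subst hki; rw [if_pos rfl] at hk; cases hk; exact ⟨hd, rfl⟩
  · rw [if_neg hki] at hk; exact hinv k c hk

theorem chainOfB_spec (gm : PySem.Dict Int (PySem.Dict String Int)) (F : Nat) :
    ∀ (f : Nat) (i : Int) (chains : PySem.Dict Int (List Int)),
      f ≤ F → pvDead gm f i = true → pvInv gm F chains →
      (chainOfB gm f i chains).1 = pvChain gm F i ∧ pvInv gm F (chainOfB gm f i chains).2 := by
  intro f
  induction f with
  | zero => intro i chains _ h _; simp [pvDead] at h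
  | succ f ih =>
    intro i chains hle h hinv
    have hdead : (match pvNext gm i with | none => true | some j => pvDead gm f j) = true := h
    have hdF : pvDead gm F i = true := pvDead_mono gm (f + 1) F i h hle
    obtain ⟨F', rfl⟩ : ∃ k, F = k + 1 := ⟨F - 1, by omega⟩
    cases hm : chains.get? i with
    | some c =>
      simp only [chainOfB, hm]
      exact ⟨(hinv i c hm).2, hinv⟩
    | none =>
      cases hq : gm.get? i with
      | none =>
        have hn : pvNext gm i = none := by simp [pvNext, hq]
        have hch : pvChain gm (F' + 1) i = [i] := by simp [pvChain, hn]
        have hres : chainOfB gm (f + 1) i chains = ([i], chains.insert i [i]) := by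
          simp [chainOfB, hm, hq]
        rw [hres]
        exact ⟨hch.symm, hch ▸ pvInv_insert gm (F' + 1) chains i hinv hdF⟩
      | some g =>
        cases hp : g.get? "parent_grupo_id" with
        | none =>
          have hn : pvNext gm i = none := by simp [pvNext, pvEff, hq, hp]
          have hch : pvChain gm (F' + 1) i = [i] := by simp [pvChain, hn]
          have hres : chainOfB gm (f + 1) i chains = ([i], chains.insert i [i]) := by
            simp [chainOfB, hm, hq, hp]
          rw [hres]
          exact ⟨hch.symm, hch ▸ pvInv_insert gm (F' + 1) chains i hinv hdF⟩
        | some p =>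
          cases hcond : (p != 0 && gm.contains p) with
          | false =>
            have hn : pvNext gm i = none := by simp [pvNext, pvEff, hq, hp, hcond]
            have hch : pvChain gm (F' + 1) i = [i] := by simp [pvChain, hn]
            have hres : chainOfB gm (f + 1) i chains = ([i], chains.insert i [i]) := by
              simp [chainOfB, hm, hq, hp, hcond]
            rw [hres]
            exact ⟨hch.symm, hch ▸ pvInv_insert gm (F' + 1) chains i hinv hdF⟩
          | true =>
            have hn : pvNext gm i = some p := by simp [pvNext, pvEff, hq, hp, hcond]
            rw [hn] at hdead
            obtain ⟨h1, h2⟩ := ih p chains (by omega) hdead hinv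
            have hch : pvChain gm (F' + 1) i = i :: pvChain gm (F' + 1) p := by
              rw [show pvChain gm (F' + 1) i = i :: pvChain gm F' p from by simp [pvChain, hn],
                pvChain_stable gm f F' p hdead (by omega),
                pvChain_stable gm f (F' + 1) p hdead (by omega)]
            have hres : chainOfB gm (f + 1) i chains =
                (i :: (chainOfB gm f p chains).1,
                  (chainOfB gm f p chains).2.insert i (i :: (chainOfB gm f p chains).1)) := by
              simp [chainOfB, hm, hq, hp, hcond]
            rw [hres]
            refine ⟨by rw [h1, ← hch], ?_⟩
            rw [h1, ← hch]
            exact pvInv_insert gm (F' + 1) (chainOfB gm f p chains).2 i h2 hdF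

-- the g_map fold never loses a key
theorem pvGmap_isSome_pres (t : List (PySem.Dict String Int)) :
    ∀ (d : PySem.Dict Int (PySem.Dict String Int)) (i : Int),
      (d.get? i).isSome = true →
      ((t.foldl (fun d g =>
        match g.get? "id" with
        | some i => d.insert i g
        | none => d) d).get? i).isSome = true := by
  induction t with
  | nil => intro d i h; exact h
  | cons g t ih =>
    intro d i h
    simp only [List.foldl_cons]
    cases hid : g.get? "id" with
    | none => exact ih d i h
    | some j =>
      dsimp only
      refine ih _ i ?_
      rw [PySem.Dict.get?_insert]
      by_cases hij : i = j
      · rw [if_pos hij]; rfl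
      · rw [if_neg hij]; exact h

-- every group id ends up bound in g_map
theorem pvGmap_mem_isSome (l : List (PySem.Dict String Int)) :
    ∀ (d : PySem.Dict Int (PySem.Dict String Int)), ∀ g ∈ l, ∀ i, g.get? "id" = some i →
      ((l.foldl (fun d g =>
        match g.get? "id" with
        | some i => d.insert i g
        | none => d) d).get? i).isSome = true := by
  induction l with
  | nil => intro d g hg; cases hg
  | cons g0 t ih =>
    intro d g hg i hi
    simp only [List.foldl_cons]
    rcases List.mem_cons.mp hg with rfl | hgt
    · rw [hi]
      dsimp only
      exact pvGmap_isSome_pres t _ i (by rw [PySem.Dict.get?_insert_self]; rfl)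
    · cases hid : g0.get? "id" with
      | none => exact ih d g hgt i hi
      | some j => exact ih _ g hgt i hi

-- every value stored in g_map is one of the groups
theorem pvGmap_val_mem (l : List (PySem.Dict String Int)) :
    ∀ (d : PySem.Dict Int (PySem.Dict String Int)) (i : Int) (g : PySem.Dict String Int),
      (l.foldl (fun d g =>
        match g.get? "id" with
        | some i => d.insert i g
        | none => d) d).get? i = some g → g ∈ l ∨ d.get? i = some g := by
  induction l with
  | nil => intro d i g h; exact Or.inr h
  | cons g0 t ih =>
    intro d i g h
    simp only [List.foldl_cons] at h
    cases hid : g0.get? "id" with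
    | none =>
      rw [hid] at h
      rcases ih d i g h with hm | hd
      · exact Or.inl (List.mem_cons_of_mem _ hm)
      · exact Or.inr hd
    | some j =>
      rw [hid] at h
      rcases ih _ i g h with hm | hd
      · exact Or.inl (List.mem_cons_of_mem _ hm)
      · rw [PySem.Dict.get?_insert] at hd
        by_cases hij : i = j
        · rw [if_pos hij] at hd; cases hd; exact Or.inl (List.mem_cons_self ..)
        · rw [if_neg hij] at hd; exact Or.inr hd

-- the two main loops agree, carrying the memo invariant along
theorem pvMainFold (gm : PySem.Dict Int (PySem.Dict String Int)) (F : Nat) (hwf : pvWF gm) :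
    ∀ (l : List (PySem.Dict String Int)) (rel : PySem.Dict Int (PySem.Set Int))
      (chains : PySem.Dict Int (List Int)),
      (∀ g ∈ l, ∃ i g0, g.get? "id" = some i ∧ gm.get? i = some g0 ∧
        pvEff gm g = pvEff gm g0 ∧ pvDead gm F i = true) →
      pvInv gm F chains →
      l.foldl (fun rel g =>
        match g.get? "id" with
        | none => rel
        | some gid => climbA gm gid F (some g) rel) rel
      = (l.foldl (fun (st : PySem.Dict Int (PySem.Set Int) × PySem.Dict Int (List Int)) g =>
          match g.get? "id" with
          | none => st
          | some gid =>
            let cc := chainOfB gm F gid st.2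
            let rel := cc.1.foldl (fun rel a =>
              (rel.modify gid [] (fun s => PySem.Set.add s a)).modify a [] (fun s => PySem.Set.add s gid)) st.1
            (rel, cc.2)) (rel, chains)).1 := by
  intro l
  induction l with
  | nil => intro rel chains _ _; rfl
  | cons g t ih =>
    intro rel chains hall hinv
    obtain ⟨i, g0, hid, hg, hpar, hd⟩ := hall g (List.mem_cons_self ..)
    simp only [List.foldl_cons, hid]
    obtain ⟨hc1, hc2⟩ := chainOfB_spec gm F F i chains le_rfl hd hinv
    rw [climbA_spec gm i F i g rel hwf hid ⟨g0, hg, hpar⟩ hd, hc1]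
    exact ih _ _ (fun g' hg' => hall g' (List.mem_cons_of_mem _ hg')) hc2

-- ===== VERDICT (by name: the statement is the Claim_ definition above) =====
theorem build_ancestry_spec : Claim_equal_build_ancestry := by
  unfold Claim_equal_build_ancestry
  intro grupos _ hpre
  simp only [Pre_build_ancestry] at hpre
  obtain ⟨h1, h2, h3⟩ := hpre
  unfold Spec_build_ancestry build_ancestry build_ancestry_alt
  dsimp only
  congr 1
  refine pvMainFold (pvGmap (grupos.map PySem.Dict.ofList)) (grupos.length + 1)
    (pvWF_pvGmap _) (grupos.map PySem.Dict.ofList) PySem.Dict.empty PySem.Dict.empty ?_ ?_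
  · intro g hg
    obtain ⟨i, hi⟩ := Option.isSome_iff_exists.mp (h1 g hg)
    obtain ⟨g0, hg0⟩ := Option.isSome_iff_exists.mp
      (pvGmap_mem_isSome (grupos.map PySem.Dict.ofList) PySem.Dict.empty g hg i hi)
    have hg0mem : g0 ∈ grupos.map PySem.Dict.ofList := by
      rcases pvGmap_val_mem (grupos.map PySem.Dict.ofList) PySem.Dict.empty i g0 hg0 with hm | hd
      · exact hm
      · rw [PySem.Dict.get?_empty] at hd; cases hd
    have hid0 : g0.get? "id" = some i := pvWF_pvGmap (grupos.map PySem.Dict.ofList) i g0 hg0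
    refine ⟨i, g0, hi, hg0, h2 g hg g0 hg0mem (by rw [hi, hid0]), ?_⟩
    have hmem : i ∈ (grupos.map PySem.Dict.ofList).filterMap (fun g => g.get? "id") :=
      List.mem_filterMap.mpr ⟨g, hg, hi⟩
    exact pvDead_mono _ grupos.length (grupos.length + 1) i (h3 i hmem) (by omega)
  · intro k c hk
    simp [PySem.Dict.get?_empty] at hk
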